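-- pv_equiv track=rewrite | github.com/hjwwjhexe/ipl-kubsu | laba1/task11-14.py | task7_sort
-- ===== SOURCE A (Python) =====
-- def task7_sort(lines):
--     vowels = "aeiouаеёиоуыэюяAEIOUАЕЁИОУЫЭЮЯ"
--
--     def vc_cv_diff(s):
--         vc = 0  # гласная-согласная
--         cv = 0  # согласная-гласная
--         for i in range(len(s) - 1):
--             if s[i].isalpha() and s[i+1].isalpha():
--                 if s[i] in vowels and s[i+1] not in vowels:
--                     vc += 1
--                 elif s[i] not in vowels and s[i+1] in vowels:
--                     cv += 1
--         return vc - cv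
--
--     return sorted(lines, key=vc_cv_diff)
-- ===== SOURCE B (Python) =====
-- def task7_sort(lines):
--     vowels = set("aeiouаеёиоуыэюяAEIOUАЕЁИОУЫЭЮЯ")
--
--     def key(s):
--         # The per-adjacent-pair sum (vowel->cons minus cons->vowel) telescopes
--         # within each maximal alphabetic run to (first is vowel) - (last is vowel).
--         total = 0
--         run = None  # (first, last) chars of the current alphabetic run
--         for ch in s:
--             if ch.isalpha():
--                 run = (ch, ch) if run is None else (run[0], ch)
--             elif run is not None:
--                 total += (run[0] in vowels) - (run[1] in vowels)
--                 run = None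
--         if run is not None:
--             total += (run[0] in vowels) - (run[1] in vowels)
--         return total
--
--     return sorted(lines, key=key)
-- ===== Notes on version B (the rewrite author's own statement) =====
-- stated objective: faster
-- what changed: A counts vowel->consonant and consonant->vowel transitions over all adjacent index pairs; B scans each line once tracking maximal alphabetic runs and uses the telescoped per-run contribution (first-is-vowel minus last-is-vowel) as the sort key, with vowel membership in a set.
import Mathlib
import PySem

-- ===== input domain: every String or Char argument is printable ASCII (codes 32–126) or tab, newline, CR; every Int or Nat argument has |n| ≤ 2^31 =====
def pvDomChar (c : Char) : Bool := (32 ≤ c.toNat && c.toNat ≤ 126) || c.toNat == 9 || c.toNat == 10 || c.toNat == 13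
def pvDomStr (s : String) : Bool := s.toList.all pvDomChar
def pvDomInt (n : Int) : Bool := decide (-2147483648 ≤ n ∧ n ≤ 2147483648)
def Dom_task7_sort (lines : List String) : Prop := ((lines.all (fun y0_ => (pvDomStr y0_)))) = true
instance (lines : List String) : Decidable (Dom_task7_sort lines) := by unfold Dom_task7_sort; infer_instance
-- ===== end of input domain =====

-- B replaces A's adjacent-pair counting key by a per-run telescoped key (same value, simpler scan); same stable sort.

-- ===== PORT A =====
-- the vowels string (1-char 'c in vowels' membership = char membership in its char list)
def pvVowels : List Char := "aeiouаеёиоуыэюяAEIOUАЕЁИОУЫЭЮЯ".toList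

-- A's loop 'for i in range(len(s)-1)' reading s[i], s[i+1]: ported as recursion over
-- the adjacent pairs of the char list (exact: i visits each adjacent pair once, in order),
-- carrying A's (vc, cv) accumulators with A's branch order.
def pvDiffAGo : List Char → Int × Int → Int × Int
  | a :: b :: t, (vc, cv) =>
      if PySem.Chars.isalpha a && PySem.Chars.isalpha b then
        if pvVowels.contains a && !(pvVowels.contains b) then
          pvDiffAGo (b :: t) (vc + 1, cv)
        else if !(pvVowels.contains a) && pvVowels.contains b then
          pvDiffAGo (b :: t) (vc, cv + 1)
        else
          pvDiffAGo (b :: t) (vc, cv)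
      else
        pvDiffAGo (b :: t) (vc, cv)
  | _, st => st

def pvVcCvDiff (s : String) : Int :=
  let st := pvDiffAGo s.toList (0, 0)
  st.1 - st.2

def task7_sort (lines : List String) : List String :=
  PySem.List.sorted lines pvVcCvDiff false

-- ===== PORT B =====
-- (b in vowels) as an Int, as Python's bool arithmetic does
def pvV (c : Char) : Int := if pvVowels.contains c then 1 else 0

-- one step of B's scan: state = (total, current run's (first, last) alpha chars)
def pvStepB (st : Int × Option (Char × Char)) (c : Char) : Int × Option (Char × Char) :=
  if PySem.Chars.isalpha c then
    match st.2 with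
    | none => (st.1, some (c, c))
    | some (f, _) => (st.1, some (f, c))
  else
    match st.2 with
    | none => st
    | some (f, l) => (st.1 + (pvV f - pvV l), none)

def pvKeyB (s : String) : Int :=
  let st := s.toList.foldl pvStepB (0, none)
  match st.2 with
  | none => st.1
  | some (f, l) => st.1 + (pvV f - pvV l)

def task7_sort_alt (lines : List String) : List String :=
  PySem.List.sorted lines pvKeyB false

-- ===== PRECONDITION & SPEC =====
def Spec_task7_sort (lines : List String) (out : List String) : Prop := out = task7_sort_alt lines
instance (lines : List String) (out : List String) : Decidable (Spec_task7_sort lines out) := by unfold Spec_task7_sort; infer_instance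

-- ===== CLAIM (what is proved, stated in full; the proofs are below) =====
def Claim_equal_task7_sort : Prop := ∀ (lines : List String), Dom_task7_sort lines → Spec_task7_sort lines (task7_sort lines)

-- ===== LEMMAS AND PROOFS =====

-- contribution of one adjacent pair to A's (vc - cv)
def pvW (a b : Char) : Int :=
  if PySem.Chars.isalpha a && PySem.Chars.isalpha b then pvV a - pvV b else 0

-- sum of pair contributions of cs, given previous char `prev`
def pvS (prev : Char) : List Char → Int
  | [] => 0
  | c :: t => pvW prev c + pvS c t

-- sum of pair contributions of a whole list
def pvPairS : List Char → Int
  | [] => 0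
  | c :: t => pvS c t

lemma pvS_of_not_alpha {c : Char} (h : PySem.Chars.isalpha c = false) (cs : List Char) :
    pvS c cs = pvPairS cs := by
  cases cs with
  | nil => rfl
  | cons b t => simp [pvS, pvPairS, pvW, h]

lemma pvDiffAGo_spec : ∀ (cs : List Char) (vc cv : Int),
    (pvDiffAGo cs (vc, cv)).1 - (pvDiffAGo cs (vc, cv)).2 = vc - cv + pvPairS cs := by
  intro cs
  induction cs with
  | nil => intro vc cv; simp [pvDiffAGo, pvPairS]
  | cons a t ih =>
    intro vc cv
    cases t with
    | nil => simp [pvDiffAGo, pvPairS, pvS]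
    | cons b t' =>
      have hpair : pvPairS (a :: b :: t') = pvW a b + pvPairS (b :: t') := rfl
      by_cases hab : (PySem.Chars.isalpha a && PySem.Chars.isalpha b) = true
      · by_cases h1 : (pvVowels.contains a && !(pvVowels.contains b)) = true
        · obtain ⟨ha', hb'⟩ : a ∈ pvVowels ∧ b ∉ pvVowels := by
            simpa [Bool.and_eq_true, Bool.not_eq_true'] using h1
          have hw : pvW a b = 1 := by
            simp only [pvW, if_pos hab, pvV]
            rw [if_pos (by simpa using ha'), if_neg (by simpa using hb')]; norm_num
          have hgo : pvDiffAGo (a :: b :: t') (vc, cv) = pvDiffAGo (b :: t') (vc + 1, cv) := by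
            simp only [pvDiffAGo, if_pos hab, if_pos h1]
          rw [hgo, ih (vc + 1) cv, hpair, hw]; ring
        · by_cases h2 : (!(pvVowels.contains a) && pvVowels.contains b) = true
          · obtain ⟨ha', hb'⟩ : a ∉ pvVowels ∧ b ∈ pvVowels := by
              simpa [Bool.and_eq_true, Bool.not_eq_true'] using h2
            have hw : pvW a b = -1 := by
              simp only [pvW, if_pos hab, pvV]
              rw [if_neg (by simpa using ha'), if_pos (by simpa using hb')]; norm_num
            have hgo : pvDiffAGo (a :: b :: t') (vc, cv) = pvDiffAGo (b :: t') (vc, cv + 1) := by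
              simp only [pvDiffAGo, if_pos hab, if_neg h1, if_pos h2]
            rw [hgo, ih vc (cv + 1), hpair, hw]; ring
          · have hw : pvW a b = 0 := by
              simp only [pvW, if_pos hab, pvV]
              cases hva : pvVowels.contains a with
              | true =>
                cases hvb : pvVowels.contains b with
                | false => exact absurd (by rw [hva, hvb]; rfl) h1
                | true => norm_num
              | false =>
                cases hvb : pvVowels.contains b with
                | true => exact absurd (by rw [hva, hvb]; rfl) h2
                | false => norm_num
            have hgo : pvDiffAGo (a :: b :: t') (vc, cv) = pvDiffAGo (b :: t') (vc, cv) := by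
              simp only [pvDiffAGo, if_pos hab, if_neg h1, if_neg h2]
            rw [hgo, ih vc cv, hpair, hw]; ring
      · have hw : pvW a b = 0 := by simp [pvW, hab]
        have hgo : pvDiffAGo (a :: b :: t') (vc, cv) = pvDiffAGo (b :: t') (vc, cv) := by
          simp only [pvDiffAGo, if_neg hab]
        rw [hgo, ih vc cv, hpair, hw]; ring

-- B's scan, generalized over the carried state (the stored last char is always alphabetic)
def pvFinish (st : Int × Option (Char × Char)) : Int :=
  match st.2 with
  | none => st.1
  | some (f, l) => st.1 + (pvV f - pvV l)

lemma pvFoldB_spec : ∀ (cs : List Char) (t : Int) (o : Option (Char × Char)),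
    (∀ f l, o = some (f, l) → PySem.Chars.isalpha l = true) →
    pvFinish (cs.foldl pvStepB (t, o)) =
      pvFinish (t, o) + (match o with | none => pvPairS cs | some (_, l) => pvS l cs) := by
  intro cs
  induction cs with
  | nil =>
    intro t o ho
    cases o with
    | none => simp [pvFinish, pvPairS]
    | some p => obtain ⟨f, l⟩ := p; simp [pvFinish, pvS]
  | cons c rest ih =>
    intro t o ho
    rw [List.foldl_cons]
    by_cases hc : PySem.Chars.isalpha c = true
    · cases o with
      | none =>
        have hstep : pvStepB (t, none) c = (t, some (c, c)) := by simp [pvStepB, hc]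
        rw [hstep, ih t (some (c, c)) (by intro f l h; cases h; exact hc)]
        have h1 : pvFinish (t, some (c, c)) = t + (pvV c - pvV c) := rfl
        have h2 : pvFinish (t, (none : Option (Char × Char))) = t := rfl
        have h3 : pvPairS (c :: rest) = pvS c rest := rfl
        rw [h1, h2]; simp [h3]
      | some p =>
        obtain ⟨f, l⟩ := p
        have hl := ho f l rfl
        have hstep : pvStepB (t, some (f, l)) c = (t, some (f, c)) := by simp [pvStepB, hc]
        rw [hstep, ih t (some (f, c)) (by intro f' l' h; cases h; exact hc)]
        have h1 : pvFinish (t, some (f, c)) = t + (pvV f - pvV c) := rfl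
        have h2 : pvFinish (t, some (f, l)) = t + (pvV f - pvV l) := rfl
        have h3 : pvS l (c :: rest) = pvW l c + pvS c rest := rfl
        have hw : pvW l c = pvV l - pvV c := by simp [pvW, hl, hc]
        rw [h1, h2]; simp only [h3, hw]; ring
    · replace hc : PySem.Chars.isalpha c = false := by simpa using hc
      cases o with
      | none =>
        have hstep : pvStepB (t, none) c = (t, none) := by simp [pvStepB, hc]
        rw [hstep, ih t none (by intro f l h; cases h)]
        have h3 : pvPairS (c :: rest) = pvS c rest := rfl
        simp only [h3, pvS_of_not_alpha hc]
      | some p =>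
        obtain ⟨f, l⟩ := p
        have hstep : pvStepB (t, some (f, l)) c = (t + (pvV f - pvV l), none) := by
          simp [pvStepB, hc]
        rw [hstep, ih (t + (pvV f - pvV l)) none (by intro f' l' h; cases h)]
        have h1 : pvFinish (t + (pvV f - pvV l), (none : Option (Char × Char))) =
            t + (pvV f - pvV l) := rfl
        have h2 : pvFinish (t, some (f, l)) = t + (pvV f - pvV l) := rfl
        have h3 : pvS l (c :: rest) = pvW l c + pvS c rest := rfl
        have hw : pvW l c = 0 := by simp [pvW, hc]
        rw [h1, h2]; simp only [h3, hw, pvS_of_not_alpha hc]; ring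
lemma key_eq (s : String) : pvVcCvDiff s = pvKeyB s := by
  have hA := pvDiffAGo_spec s.toList 0 0
  have hB := pvFoldB_spec s.toList 0 none (by intro f l h; cases h)
  have hfin : pvKeyB s = pvFinish (s.toList.foldl pvStepB (0, none)) := rfl
  rw [hfin, hB]
  have h2 : pvFinish ((0 : Int), (none : Option (Char × Char))) = 0 := rfl
  rw [h2]
  have hA' : pvVcCvDiff s = 0 - 0 + pvPairS s.toList := by
    rw [← hA]; rfl
  rw [hA']; ring

-- ===== VERDICT (by name: the statement is the Claim_ definition above) =====
theorem task7_sort_spec : Claim_equal_task7_sort := by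
  intro lines _
  unfold Spec_task7_sort task7_sort task7_sort_alt
  have : pvVcCvDiff = pvKeyB := funext key_eq
  rw [this]
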